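-- pv_equiv track=rewrite | github.com/MrBrantCode/unitest_baseline | mut_generate/mist_train_cf/cf_9042/solution.py | remove_odd_index_chars
-- ===== SOURCE A (Python) =====
-- import string
--
-- def remove_odd_index_chars(s):
--     # Create a string of all punctuation marks
--     punctuations = string.punctuation
--
--     # Initialize an empty string to store the modified string
--     modified_string = ""
--
--     # Iterate over each character in the input string
--     for i, char in enumerate(s):
--         # Ignore punctuation marks
--         if char in punctuations:
--             continue
--
--         # Remove characters with odd index values
--         if i % 2 == 0:
--             modified_string += char
--
--     return modified_string
-- ===== SOURCE B (Python) =====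
-- import string
--
-- def remove_odd_index_chars(s):
--     # Take the even-index subsequence by stride slicing, then drop punctuation.
--     return ''.join(c for c in s[::2] if c not in string.punctuation)
-- ===== Notes on version B (the rewrite author's own statement) =====
-- stated objective: idiomatic
-- what changed: B replaces the explicit enumerate loop with its parity branch by a stride slice s[::2] that selects the even-index characters, followed by a single punctuation filter joined once.
import Mathlib
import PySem

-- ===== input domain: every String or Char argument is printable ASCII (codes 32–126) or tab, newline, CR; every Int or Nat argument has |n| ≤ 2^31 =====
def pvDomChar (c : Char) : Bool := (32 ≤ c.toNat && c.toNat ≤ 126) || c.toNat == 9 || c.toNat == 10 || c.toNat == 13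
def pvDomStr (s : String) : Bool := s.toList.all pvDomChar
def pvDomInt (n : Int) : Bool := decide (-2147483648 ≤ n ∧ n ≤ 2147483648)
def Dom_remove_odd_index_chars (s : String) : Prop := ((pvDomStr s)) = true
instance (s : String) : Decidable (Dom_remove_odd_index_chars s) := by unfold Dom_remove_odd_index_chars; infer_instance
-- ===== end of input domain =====

-- B keeps the same return values; it selects even indices with a stride slice instead of a parity test.

-- ===== PORT A =====
-- string.punctuation
def pvPunct : List Char := "!\"#$%&'()*+,-./:;<=>?@[\\]^_`{|}~".toList

-- literal port of A: enumerate loop, skip punctuation, keep characters at even index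
def remove_odd_index_chars (s : String) : String :=
  let modified :=
    (PySem.List.enumerate s.toList 0).foldl
      (fun acc p =>
        if pvPunct.contains p.2 then acc
        else if p.1 % 2 == 0 then acc ++ [p.2] else acc)
      ([] : List Char)
  String.ofList modified

-- ===== PORT B =====
-- literal port of B: s[::2] (stride slice), then filter out punctuation
def remove_odd_index_chars_alt (s : String) : String :=
  match PySem.List.slice? s.toList none none 2 with
  | some evens => String.ofList (evens.filter (fun c => !(pvPunct.contains c)))
  | none => ""   -- unreachable: step 2 ≠ 0

-- ===== PRECONDITION & SPEC =====
def Spec_remove_odd_index_chars (s : String) (out : String) : Prop := out = remove_odd_index_chars_alt s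
instance (s : String) (out : String) : Decidable (Spec_remove_odd_index_chars s out) := by unfold Spec_remove_odd_index_chars; infer_instance

-- ===== CLAIM (what is proved, stated in full; the proofs are below) =====
def Claim_equal_remove_odd_index_chars : Prop := ∀ (s : String), Dom_remove_odd_index_chars s → Spec_remove_odd_index_chars s (remove_odd_index_chars s)

-- ===== LEMMAS AND PROOFS =====

-- the even-index subsequence
def pvEveryOther {α : Type} : List α → List α
  | [] => []
  | [a] => [a]
  | a :: _ :: r => a :: pvEveryOther r

lemma pv_filterMap_range_two {α : Type} : ∀ (xs : List α),
    (List.range ((xs.length + 1) / 2)).filterMap (fun k => xs[2 * k]?) = pvEveryOther xs := by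
  intro xs
  induction xs using pvEveryOther.induct with
  | case1 => simp [pvEveryOther]
  | case2 a => simp [pvEveryOther]
  | case3 a b r ih =>
    have hlen : ((a :: b :: r).length + 1) / 2 = (r.length + 1) / 2 + 1 := by
      simp; omega
    rw [hlen, List.range_succ_eq_map, List.filterMap_cons, List.filterMap_map]
    have h0 : (a :: b :: r)[2 * 0]? = some a := by simp
    rw [h0]
    have hfun : ((fun k => (a :: b :: r)[2 * k]?) ∘ Nat.succ) = (fun k => r[2 * k]?) := by
      funext k
      simp [Function.comp, Nat.mul_succ]
    rw [hfun, ih]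
    simp [pvEveryOther]

lemma pv_slice2 {α : Type} (xs : List α) :
    PySem.List.slice? xs none none 2 = some (pvEveryOther xs) := by
  unfold PySem.List.slice? PySem.List.sliceIndices
  norm_num
  have hc : (if 0 < xs.length then (((xs.length : Int) + 2 - 1) / 2).toNat else 0)
      = (xs.length + 1) / 2 := by
    split_ifs with h <;> omega
  rw [hc]
  have hfun : ∀ k : Nat, xs[(2 * (k : Int)).toNat]? = xs[2 * k]? := by
    intro k
    have h2 : (2 * (k : Int)).toNat = 2 * k := by omega
    rw [h2]
  simp only [hfun]
  exact pv_filterMap_range_two xs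

lemma pv_loopA (cs : List Char) : ∀ (n : Int) (acc : List Char), n % 2 = 0 →
    (PySem.List.enumerate cs n).foldl
      (fun acc p =>
        if pvPunct.contains p.2 then acc
        else if p.1 % 2 == 0 then acc ++ [p.2] else acc) acc
    = acc ++ (pvEveryOther cs).filter (fun c => !(pvPunct.contains c)) := by
  induction cs using pvEveryOther.induct with
  | case1 => intro n acc _; simp [PySem.List.enumerate_nil, pvEveryOther]
  | case2 a =>
    intro n acc hn
    have hdvd : (2 : Int) ∣ n := by omega
    by_cases hp : a ∈ pvPunct
    · simp [PySem.List.enumerate_cons, PySem.List.enumerate_nil, pvEveryOther, hp]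
    · simp [PySem.List.enumerate_cons, PySem.List.enumerate_nil, pvEveryOther, hp, hdvd]
  | case3 a b r ih =>
    intro n acc hn
    have hn1 : ((n + 1) % 2 == 0) = false := by
      simp only [beq_eq_false_iff_ne, ne_eq]
      omega
    have hn2 : (n + 2) % 2 = 0 := by omega
    have hdvd : (2 : Int) ∣ n := by omega
    simp only [PySem.List.enumerate_cons, List.foldl_cons]
    have hstep2 : ∀ acc' : List Char,
        (if pvPunct.contains b then acc'
         else if ((n + 1) % 2 == 0) then acc' ++ [b] else acc') = acc' := by
      intro acc'; rw [hn1]; simp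
    rw [hstep2, show n + 1 + 1 = n + 2 from by ring, ih (n + 2) _ hn2]
    by_cases hp : a ∈ pvPunct
    · simp [hp, pvEveryOther]
    · simp [hp, hdvd, pvEveryOther]

-- ===== VERDICT (by name: the statement is the Claim_ definition above) =====
theorem remove_odd_index_chars_spec : Claim_equal_remove_odd_index_chars := by
  intro s _
  unfold Spec_remove_odd_index_chars remove_odd_index_chars remove_odd_index_chars_alt
  rw [pv_slice2]
  simp only
  rw [pv_loopA s.toList 0 [] (by norm_num)]
  simp
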